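-- pv_equiv track=rewrite | github.com/Qumpell/Graph-algorithms-lab | lab4/KantorskiMateusz.py | new_root
-- ===== SOURCE A (Python) =====
-- def new_root(v, root, predecessor):
--     x_old = root[v]
--     if x_old == v:
--         return predecessor
--     u1 = None
--     u2 = v
--     while u1 != x_old:
--         p = u1
--         u1 = u2
--         u2 = predecessor[u1]
--         predecessor[u1] = p
--     return predecessor
-- ===== SOURCE B (Python) =====
-- # B: two-phase reroot — collect the predecessor chain from v to the old root,
-- # then rewrite the links in a second pass (mutates `predecessor` in place like A).
-- def new_root(v, root, predecessor):
--     x_old = root[v]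
--     if x_old == v:
--         return predecessor
--     path = []
--     cur = v
--     while cur != x_old:
--         path.append(cur)
--         cur = predecessor[cur]
--     path.append(x_old)
--     prev = None
--     for node in path:
--         predecessor[node] = prev
--         prev = node
--     return predecessor
-- ===== Notes on version B (the rewrite author's own statement) =====
-- stated objective: alternative
-- what changed: A's single in-place walk that swaps three pointers (p, u1, u2) while rewriting links is replaced by a two-phase decomposition: first collect the predecessor chain from v to the old root into a list, then rewrite all links in a separate pass.
-- crash fix: When the old root x_old is reachable from v but is not a key of predecessor, A raises KeyError reading predecessor[x_old] (a value it never uses) while B returns the rerooted dict with x_old's entry appended. — e.g. on new_root(1, [(1, 2)], [(1, some 2)]): A raises KeyError, B returns [(1, none), (2, some 1)]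
import Mathlib
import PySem

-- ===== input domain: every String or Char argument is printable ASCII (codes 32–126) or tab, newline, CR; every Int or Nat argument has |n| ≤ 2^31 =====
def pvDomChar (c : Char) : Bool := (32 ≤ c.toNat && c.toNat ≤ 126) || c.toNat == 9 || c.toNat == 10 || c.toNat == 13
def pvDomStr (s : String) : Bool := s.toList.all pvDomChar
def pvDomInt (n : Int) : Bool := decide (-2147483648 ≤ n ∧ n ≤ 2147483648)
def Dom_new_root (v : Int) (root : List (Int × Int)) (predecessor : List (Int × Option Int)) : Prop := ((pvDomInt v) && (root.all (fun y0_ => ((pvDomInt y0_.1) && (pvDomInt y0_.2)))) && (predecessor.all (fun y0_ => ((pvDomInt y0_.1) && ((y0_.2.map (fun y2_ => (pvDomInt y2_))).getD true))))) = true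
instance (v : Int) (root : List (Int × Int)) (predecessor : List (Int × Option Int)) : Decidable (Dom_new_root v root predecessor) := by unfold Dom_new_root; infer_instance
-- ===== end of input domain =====

-- B replaces A's one-pass in-place pointer-swapping walk by a two-phase decomposition
-- (collect the chain from v to the old root, then rewrite the links in a second pass);
-- both Pythons mutate `predecessor` in place identically and return it — the theorems are about the returned dict.

-- ===== PORT A =====
-- A's while loop: u1 ≠ x_old → p := u1; u1 := u2; u2 := predecessor[u1]; predecessor[u1] := p.
-- `none` results of pyGet/dict lookups (Python KeyError) just stop and return the current state: excluded by Pre_.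
def newRootGo (x_old : Int) (u1 u2 : Option Int) (pred : PySem.Dict Int (Option Int)) : Nat → PySem.Dict Int (Option Int)
  | 0 => pred
  | fuel + 1 =>
    if u1 = some x_old then pred
    else
      match u2 with
      | none => pred            -- Python: predecessor[None] raises TypeError/KeyError (outside Pre_)
      | some k =>
        match pred.get? k with
        | none => pred          -- Python: KeyError (outside Pre_)
        | some nxt => newRootGo x_old (some k) nxt (pred.insert k u1) fuel

def new_root (v : Int) (root : List (Int × Int)) (predecessor : List (Int × Option Int)) : List (Int × Option Int) :=
  match (PySem.Dict.mk root).get? v with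
  | none => predecessor         -- Python: KeyError (outside Pre_)
  | some x_old =>
    if x_old = v then predecessor
    else (newRootGo x_old none (some v) (PySem.Dict.mk predecessor) (predecessor.length + 2)).items

-- ===== PORT B =====
-- B phase 1: path = []; cur = v; while cur ≠ x_old: path.append(cur); cur := predecessor[cur]
def collectGo (x_old : Int) (pred : PySem.Dict Int (Option Int)) (path : List Int) (cur : Int) : Nat → List Int
  | 0 => path
  | fuel + 1 =>
    if cur = x_old then path
    else
      match pred.get? cur with
      | some (some nxt) => collectGo x_old pred (path ++ [cur]) nxt fuel
      | _ => path               -- Python: KeyError on the next lookup (outside Pre_)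

def new_root_alt (v : Int) (root : List (Int × Int)) (predecessor : List (Int × Option Int)) : List (Int × Option Int) :=
  match (PySem.Dict.mk root).get? v with
  | none => predecessor         -- Python: KeyError (outside Pre_)
  | some x_old =>
    if x_old = v then predecessor
    else
      -- B phase 2: prev = None; for node in path: predecessor[node] := prev; prev := node
      (((collectGo x_old (PySem.Dict.mk predecessor) [] v (predecessor.length + 1) ++ [x_old]).foldl
          (fun s node => (s.1.insert node s.2, some node))
          (PySem.Dict.mk predecessor, (none : Option Int))).1).items

-- ===== PRECONDITION & SPEC =====
-- The original-dict predecessor chain from v: stops at the first occurrence of x.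
def chainTo (pred : PySem.Dict Int (Option Int)) (x : Int) : Nat → Int → Option (List Int)
  | 0, k => if k = x then some [k] else none
  | n + 1, k =>
    if k = x then some [k]
    else
      match pred.get? k with
      | some (some k') => (chainTo pred x n k').map (k :: ·)
      | _ => none

-- Pre_ = exactly the inputs on which A returns: v is a key of root, and either root[v] = v, or the
-- predecessor chain from v reaches x_old = root[v] without repeating a node (a repeat makes the
-- deterministic walk periodic, so A loops or raises) and x_old itself is a key (A reads predecessor[x_old]).
def Pre_new_root (v : Int) (root : List (Int × Int)) (predecessor : List (Int × Option Int)) : Prop :=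
  (match (PySem.Dict.mk root).get? v with
   | none => false
   | some x =>
     (x == v) ||
     (match chainTo (PySem.Dict.mk predecessor) x (predecessor.length + 1) v with
      | some l => decide l.Nodup && ((PySem.Dict.mk predecessor).get? x).isSome
      | none => false)) = true
instance (v : Int) (root : List (Int × Int)) (predecessor : List (Int × Option Int)) : Decidable (Pre_new_root v root predecessor) := by unfold Pre_new_root; infer_instance

def pvWitness_new_root : Int × (List (Int × Int)) × (List (Int × Option Int)) :=
  (1, [(1, 3)], [(1, some 2), (2, some 3), (3, none)])

-- When the old root x_old is reachable from v but missing from predecessor, A raises KeyError reading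
-- predecessor[x_old] (a value it never uses) while B returns the rerooted dict with x_old's entry appended.
def Raises_new_root (v : Int) (root : List (Int × Int)) (predecessor : List (Int × Option Int)) : Prop :=
  (match (PySem.Dict.mk root).get? v with
   | none => false
   | some x =>
     (x != v) &&
     (match chainTo (PySem.Dict.mk predecessor) x (predecessor.length + 1) v with
      | some l => decide l.Nodup && !((PySem.Dict.mk predecessor).get? x).isSome
      | none => false)) = true
instance (v : Int) (root : List (Int × Int)) (predecessor : List (Int × Option Int)) : Decidable (Raises_new_root v root predecessor) := by unfold Raises_new_root; infer_instance

def pvRaiseWitness_new_root : Int × (List (Int × Int)) × (List (Int × Option Int)) :=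
  (1, [(1, 2)], [(1, some 2)])
def pvRaiseWitnessOut_new_root : List (Int × Option Int) := [(1, none), (2, some 1)]

def Spec_new_root (v : Int) (root : List (Int × Int)) (predecessor : List (Int × Option Int)) (out : List (Int × Option Int)) : Prop := out = new_root_alt v root predecessor
instance (v : Int) (root : List (Int × Int)) (predecessor : List (Int × Option Int)) (out : List (Int × Option Int)) : Decidable (Spec_new_root v root predecessor out) := by unfold Spec_new_root; infer_instance

-- ===== CLAIM (what is proved, stated in full; the proofs are below) =====
def Claim_equal_new_root : Prop := ∀ (v : Int) (root : List (Int × Int)) (predecessor : List (Int × Option Int)), Dom_new_root v root predecessor → Pre_new_root v root predecessor → Spec_new_root v root predecessor (new_root v root predecessor)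

def Claim_raises_new_root : Prop := (∀ (v : Int) (root : List (Int × Int)) (predecessor : List (Int × Option Int)), Dom_new_root v root predecessor → Raises_new_root v root predecessor → ¬ Pre_new_root v root predecessor) ∧ (Dom_new_root (pvRaiseWitness_new_root.1) (pvRaiseWitness_new_root.2.1) (pvRaiseWitness_new_root.2.2) ∧ Raises_new_root (pvRaiseWitness_new_root.1) (pvRaiseWitness_new_root.2.1) (pvRaiseWitness_new_root.2.2) ∧ new_root_alt (pvRaiseWitness_new_root.1) (pvRaiseWitness_new_root.2.1) (pvRaiseWitness_new_root.2.2) = pvRaiseWitnessOut_new_root)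

-- ===== LEMMAS AND PROOFS =====

-- Rewriting the links along a list of nodes (what both ports' second phase/walk amounts to).
def writeChain (d : PySem.Dict Int (Option Int)) (prev : Option Int) : List Int → PySem.Dict Int (Option Int)
  | [] => d
  | k :: rest => writeChain (d.insert k prev) (some k) rest

theorem foldl_eq_writeChain (l : List Int) (d : PySem.Dict Int (Option Int)) (prev : Option Int) :
    (l.foldl (fun s node => (s.1.insert node s.2, some node)) (d, prev)).1 = writeChain d prev l := by
  induction l generalizing d prev with
  | nil => rfl
  | cons k rest ih => simpa [List.foldl, writeChain] using ih (d.insert k prev) (some k)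

theorem chainTo_mem_isSome (p : PySem.Dict Int (Option Int)) (x : Int) :
    ∀ f k l, chainTo p x f k = some l → (p.get? x).isSome = true →
      ∀ j ∈ l, (p.get? j).isSome = true := by
  intro f
  induction f with
  | zero =>
    intro k l h hx j hj
    simp only [chainTo] at h
    split at h
    · next hk => cases h; simp only [List.mem_singleton] at hj; subst hj; subst hk; exact hx
    · exact absurd h (by simp)
  | succ f ih =>
    intro k l h hx j hj
    simp only [chainTo] at h
    split at h
    · next hk => cases h; simp only [List.mem_singleton] at hj; subst hj; subst hk; exact hx
    · next hk =>
      split at h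
      case _ k' hg =>
        cases hc : chainTo p x f k' with
        | none => rw [hc] at h; exact absurd h (by simp)
        | some rest =>
          rw [hc] at h
          cases h
          rcases List.mem_cons.mp hj with rfl | hj'
          · simp [hg]
          · exact ih k' rest hc hx j hj'
      case _ => exact absurd h (by simp)

theorem loopA_chain (p : PySem.Dict Int (Option Int)) (x : Int) :
    ∀ f k l (d : PySem.Dict Int (Option Int)) (prev : Option Int) (fuel : Nat),
      chainTo p x f k = some l → l.Nodup → (p.get? x).isSome = true →
      (∀ j ∈ l, d.get? j = p.get? j) → prev ≠ some x → l.length + 1 ≤ fuel →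
      newRootGo x prev (some k) d fuel = writeChain d prev l := by
  intro f
  induction f with
  | zero =>
    intro k l d prev fuel h hnd hx hinv hprev hfuel
    simp only [chainTo] at h
    split at h
    · next hk =>
      cases h; subst hk
      obtain ⟨fuel, rfl⟩ : ∃ m, fuel = m + 2 := ⟨fuel - 2, by simp at hfuel; omega⟩
      have hd : d.get? k = p.get? k := hinv k (by simp)
      obtain ⟨w, hw⟩ := Option.isSome_iff_exists.mp hx
      simp only [newRootGo, if_neg hprev, hd, hw]
      simp [writeChain]
    · exact absurd h (by simp)
  | succ f ih =>
    intro k l d prev fuel h hnd hx hinv hprev hfuel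
    simp only [chainTo] at h
    split at h
    · next hk =>
      cases h; subst hk
      obtain ⟨fuel, rfl⟩ : ∃ m, fuel = m + 2 := ⟨fuel - 2, by simp at hfuel; omega⟩
      have hd : d.get? k = p.get? k := hinv k (by simp)
      obtain ⟨w, hw⟩ := Option.isSome_iff_exists.mp hx
      simp only [newRootGo, if_neg hprev, hd, hw]
      simp [writeChain]
    · next hk =>
      split at h
      case _ k' hg =>
        cases hc : chainTo p x f k' with
        | none => rw [hc] at h; exact absurd h (by simp)
        | some rest =>
          rw [hc] at h
          cases h
          obtain ⟨fuel, rfl⟩ : ∃ m, fuel = m + 1 := ⟨fuel - 1, by simp at hfuel; omega⟩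
          have hknotin : k ∉ rest := (List.nodup_cons.mp hnd).1
          have hd : d.get? k = p.get? k := hinv k (by simp)
          simp only [newRootGo, if_neg hprev, hd, hg]
          rw [ih k' rest (d.insert k prev) (some k) fuel hc (List.nodup_cons.mp hnd).2 hx
            (fun j hj => by
              rw [PySem.Dict.get?_insert_of_ne d (k := k) (k' := j) prev
                (fun hjk => hknotin (hjk ▸ hj))]
              exact hinv j (List.mem_cons_of_mem _ hj))
            (fun hkx => hk (by injection hkx)) (by simp at hfuel ⊢; omega)]
          rfl
      case _ => exact absurd h (by simp)

theorem collect_chain (p : PySem.Dict Int (Option Int)) (x : Int) :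
    ∀ f k l (acc : List Int) (fuel : Nat),
      chainTo p x f k = some l → l.length ≤ fuel →
      collectGo x p acc k fuel ++ [x] = acc ++ l := by
  intro f
  induction f with
  | zero =>
    intro k l acc fuel h hfuel
    simp only [chainTo] at h
    split at h
    · next hk =>
      cases h; subst hk
      obtain ⟨fuel, rfl⟩ : ∃ m, fuel = m + 1 := ⟨fuel - 1, by simp at hfuel; omega⟩
      simp [collectGo]
    · exact absurd h (by simp)
  | succ f ih =>
    intro k l acc fuel h hfuel
    simp only [chainTo] at h
    split at h
    · next hk =>
      cases h; subst hk
      obtain ⟨fuel, rfl⟩ : ∃ m, fuel = m + 1 := ⟨fuel - 1, by simp at hfuel; omega⟩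
      simp [collectGo]
    · next hk =>
      split at h
      case _ k' hg =>
        cases hc : chainTo p x f k' with
        | none => rw [hc] at h; exact absurd h (by simp)
        | some rest =>
          rw [hc] at h
          cases h
          obtain ⟨fuel, rfl⟩ : ∃ m, fuel = m + 1 := ⟨fuel - 1, by simp at hfuel; omega⟩
          simp only [collectGo, if_neg hk, hg]
          rw [ih k' rest (acc ++ [k]) fuel hc (by simp at hfuel ⊢; omega)]
          simp
      case _ => exact absurd h (by simp)

theorem nodup_chain_length_le (p : PySem.Dict Int (Option Int)) (x : Int) (l : List Int)
    (f : Nat) (k : Int) (h : chainTo p x f k = some l) (hnd : l.Nodup)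
    (hx : (p.get? x).isSome = true) : l.length ≤ p.items.length := by
  have hsub : l ⊆ p.keys := by
    intro j hj
    have := chainTo_mem_isSome p x f k l h hx j hj
    have hne : p.get? j ≠ none := by
      intro hcon; rw [hcon] at this; simp at this
    exact by
      by_contra hmem
      exact hne ((PySem.Dict.get?_eq_none_iff_not_mem_keys _ _).mpr hmem)
  have := (hnd.subperm hsub).length_le
  simpa [PySem.Dict.keys] using this

-- ===== VERDICT (by name: the statement is the Claim_ definition above) =====
theorem new_root_spec : Claim_equal_new_root := by
  intro v root predecessor _ hpre
  unfold Spec_new_root new_root new_root_alt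
  unfold Pre_new_root at hpre
  cases hg : (PySem.Dict.mk root).get? v with
  | none => rw [hg] at hpre
  | some x =>
    rw [hg] at hpre
    dsimp only at hpre ⊢
    by_cases hxv : x = v
    · simp [hxv]
    · rw [if_neg hxv, if_neg hxv]
      cases hc : chainTo (PySem.Dict.mk predecessor) x (predecessor.length + 1) v with
      | none => rw [hc] at hpre; dsimp only at hpre; simp [hxv] at hpre
      | some l =>
        rw [hc] at hpre
        dsimp only at hpre
        simp only [Bool.or_eq_true, beq_iff_eq, Bool.and_eq_true, decide_eq_true_eq] at hpre
        rcases hpre with hpre | ⟨hnd, hx⟩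
        · exact absurd hpre hxv
        · have hlen : l.length ≤ predecessor.length :=
            nodup_chain_length_le _ x l _ v hc hnd hx
          rw [loopA_chain (PySem.Dict.mk predecessor) x _ v l _ none _ hc hnd hx
                (fun _ _ => rfl) (by simp) (by omega)]
          rw [collect_chain (PySem.Dict.mk predecessor) x _ v l [] _ hc (by omega)]
          rw [List.nil_append, foldl_eq_writeChain]

@[simp] theorem new_root_raises : Claim_raises_new_root := by
  unfold Claim_raises_new_root
  constructor
  · intro v root predecessor _ hr hp
    unfold Raises_new_root at hr
    unfold Pre_new_root at hp
    cases hg : (PySem.Dict.mk root).get? v with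
    | none => rw [hg] at hr; simp at hr
    | some x =>
      rw [hg] at hr hp
      dsimp only at hr hp
      cases hc : chainTo (PySem.Dict.mk predecessor) x (predecessor.length + 1) v with
      | none => rw [hc] at hr; dsimp only at hr; simp at hr
      | some l =>
        rw [hc] at hr hp
        dsimp only at hr hp
        simp only [bne_iff_ne, Bool.and_eq_true, decide_eq_true_eq, Bool.not_eq_true',
          Bool.or_eq_true, beq_iff_eq] at hr hp
        rcases hp with hp | hp
        · exact hr.1 hp
        · rw [hr.2.2] at hp; simp at hp
  · refine ⟨by decide, by decide, by decide⟩
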